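-- pv_equiv track=rewrite | github.com/camel-ai/gecko | gecko/utils/config_updater.py | _collapse_redundant_root_suffix
-- ===== SOURCE A (Python) =====
-- def _collapse_redundant_root_suffix(path_str: str) -> str:
--     """Collapse duplicated toolkit-root suffixes in malformed logical paths.
--
--     Example:
--     ``GorillaFileSystem/root/workspace/root/workspace`` ->
--     ``GorillaFileSystem/root/workspace``
--     """
--     segments = [s for s in path_str.strip("/").split("/") if s]
--     if len(segments) < 5:
--         return path_str
--
--     # Expected shape starts with "<toolkit>/<root>/..."
--     root_idx = 1
--     if len(segments) <= root_idx:
--         return path_str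
--     root_key = segments[root_idx]
--
--     # Detect: <toolkit>/<root>/<A...>/<root>/<A...>
--     for split in range(root_idx + 2, len(segments)):
--         if segments[split] != root_key:
--             continue
--         left = segments[root_idx + 1 : split]
--         right = segments[split + 1 :]
--         if left and left == right:
--             return "/".join(segments[:split])
--
--     return path_str
-- ===== SOURCE B (Python) =====
-- def _collapse_redundant_root_suffix(path_str: str) -> str:
--     """Collapse duplicated toolkit-root suffixes by checking the single
--     possible split point (the midpoint) instead of scanning all splits."""
--     segments = [s for s in path_str.strip("/").split("/") if s]
--     n = len(segments)
--     if n < 5 or (n + 1) % 2 != 0: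
--         return path_str
--     split = (n + 1) // 2
--     if segments[split] == segments[1] and segments[2:split] == segments[split + 1:]:
--         return "/".join(segments[:split])
--     return path_str
-- ===== Notes on version B (the rewrite author's own statement) =====
-- stated objective: simpler
-- what changed: Instead of scanning every split index for a matching root key and equal halves, B computes the single arithmetically possible split point (the midpoint, which is forced by the length equation left == right) and checks only it.
import Mathlib
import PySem

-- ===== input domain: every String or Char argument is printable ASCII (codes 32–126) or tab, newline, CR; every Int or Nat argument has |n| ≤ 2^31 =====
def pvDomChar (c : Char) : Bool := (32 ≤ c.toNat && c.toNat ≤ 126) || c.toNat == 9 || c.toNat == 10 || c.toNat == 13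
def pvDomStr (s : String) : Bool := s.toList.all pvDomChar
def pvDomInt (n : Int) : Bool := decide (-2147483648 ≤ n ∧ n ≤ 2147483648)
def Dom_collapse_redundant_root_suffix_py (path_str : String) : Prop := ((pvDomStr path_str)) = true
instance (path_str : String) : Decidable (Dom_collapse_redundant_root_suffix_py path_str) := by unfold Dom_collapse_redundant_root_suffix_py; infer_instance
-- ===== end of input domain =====

-- B replaces A's scan over all candidate split indices by a single check of the
-- arithmetically forced midpoint split (simpler; equivalence proved for all inputs).

-- shared preprocessing: segments = [s for s in path_str.strip("/").split("/") if s]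
-- (the separator is the literal "/" ≠ "", so Str.split? is always `some`)
def pvSegments (path_str : String) : List String :=
  ((PySem.Str.split? (PySem.Str.stripChars path_str "/") "/").getD []).filter (fun s => !(s == ""))

-- ===== PORT A =====
def pvLoopA (segments : List String) (root_key : String) : List Int → Option String
  | [] => none
  | split :: rest =>
      if PySem.List.pyGetD segments split "" != root_key then pvLoopA segments root_key rest
      else
        let left := PySem.List.slice segments (some (1 + 1)) (some split)
        let right := PySem.List.slice segments (some (split + 1)) none
        if left ≠ [] ∧ left = right then
          some (PySem.Str.join "/" (PySem.List.slice segments none (some split)))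
        else pvLoopA segments root_key rest

def collapse_redundant_root_suffix_py (path_str : String) : String :=
  let segments := pvSegments path_str
  if segments.length < 5 then path_str
  else
    let root_idx : Int := 1
    if PySem.List.len segments ≤ root_idx then path_str
    else
      let root_key := PySem.List.pyGetD segments root_idx ""
      match pvLoopA segments root_key
          (PySem.List.pyRange (root_idx + 2) (PySem.List.len segments) 1) with
      | some r => r
      | none => path_str

-- ===== PORT B =====
def collapse_redundant_root_suffix_py_alt (path_str : String) : String :=
  let segments := pvSegments path_str
  let n := segments.length
  if n < 5 ∨ (n + 1) % 2 ≠ 0 then path_str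
  else
    let split := (n + 1) / 2
    if segments.getD split "" == segments.getD 1 ""
        && ((segments.drop 2).take (split - 2) == segments.drop (split + 1)) then
      PySem.Str.join "/" (segments.take split)
    else path_str

-- ===== PRECONDITION & SPEC =====
def Spec_collapse_redundant_root_suffix_py (path_str : String) (out : String) : Prop := out = collapse_redundant_root_suffix_py_alt path_str
instance (path_str : String) (out : String) : Decidable (Spec_collapse_redundant_root_suffix_py path_str out) := by unfold Spec_collapse_redundant_root_suffix_py; infer_instance

-- ===== CLAIM (what is proved, stated in full; the proofs are below) =====
def Claim_equal_collapse_redundant_root_suffix_py : Prop := ∀ (path_str : String), Dom_collapse_redundant_root_suffix_py path_str → Spec_collapse_redundant_root_suffix_py path_str (collapse_redundant_root_suffix_py path_str)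

-- ===== LEMMAS AND PROOFS =====

-- the loop body of A, as a function of the split index
def pvG (segments : List String) (root_key : String) (split : Int) : Option String :=
  if PySem.List.pyGetD segments split "" != root_key then none
  else if PySem.List.slice segments (some (1 + 1)) (some split) ≠ [] ∧
      PySem.List.slice segments (some (1 + 1)) (some split) =
        PySem.List.slice segments (some (split + 1)) none then
    some (PySem.Str.join "/" (PySem.List.slice segments none (some split)))
  else none

theorem pvLoopA_eq_findSome? (segments : List String) (root_key : String) (l : List Int) :
    pvLoopA segments root_key l = l.findSome? (pvG segments root_key) := by
  induction l with
  | nil => rfl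
  | cons a rest ih =>
    simp only [pvLoopA, pvG, List.findSome?_cons]
    split_ifs <;> simp [ih]

theorem findSome?_of_unique {g : Int → Option String} (v : Int) (l : List Int)
    (h : ∀ x ∈ l, x ≠ v → g x = none) :
    l.findSome? g = if v ∈ l then g v else none := by
  induction l with
  | nil => simp
  | cons a rest ih =>
    by_cases hav : a = v
    · subst hav
      cases hg : g a with
      | some r => simp [hg]
      | none =>
        simp only [List.findSome?_cons, hg]
        rw [ih (fun x hx => h x (List.mem_cons_of_mem _ hx))]
        by_cases hv : a ∈ rest <;> simp [hv, hg]
    · have hga : g a = none := h a (List.mem_cons_self) hav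
      simp only [List.findSome?_cons, hga]
      rw [ih (fun x hx => h x (List.mem_cons_of_mem _ hx))]
      simp [List.mem_cons, Ne.symm hav]

-- at any in-range split index other than the midpoint, left and right have different
-- lengths, so A's body yields none
theorem pvG_eq_none (segments : List String) (root_key : String) (split : Int)
    (h3 : 3 ≤ split) (hlt : split < (segments.length : Int))
    (hne : 2 * split ≠ (segments.length : Int) + 1) :
    pvG segments root_key split = none := by
  obtain ⟨k, rfl⟩ : ∃ k : Nat, split = (k : Int) :=
    ⟨split.toNat, (Int.toNat_of_nonneg (by omega)).symm⟩
  unfold pvG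
  have e1 : ((1 : Int) + 1) = ((2 : Nat) : Int) := by norm_num
  have e2 : ((k : Int) + 1) = (((k + 1 : Nat)) : Int) := by push_cast; ring
  rw [e1, e2, PySem.List.slice_natCast, PySem.List.slice_from_natCast]
  split_ifs with h1 h2
  · rfl
  · exfalso
    obtain ⟨hL, hE⟩ := h2
    have hlen := congrArg List.length hE
    simp only [List.length_take, List.length_drop] at hlen
    omega
  · rfl

theorem pvG_mid (segs : List String) (h5 : 5 ≤ segs.length)
    (hpar : (segs.length + 1) % 2 = 0) :
    pvG segs (PySem.List.pyGetD segs 1 "") (((segs.length + 1) / 2 : Nat) : Int)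
    = (if segs.getD ((segs.length + 1) / 2) "" == segs.getD 1 ""
           && ((segs.drop 2).take ((segs.length + 1) / 2 - 2)
                == segs.drop ((segs.length + 1) / 2 + 1)) then
        some (PySem.Str.join "/" (segs.take ((segs.length + 1) / 2)))
      else none) := by
  have hm3 : 3 ≤ (segs.length + 1) / 2 := by omega
  have hmn : (segs.length + 1) / 2 < segs.length := by omega
  set m := (segs.length + 1) / 2 with hm
  unfold pvG
  have e1 : ((1 : Int) + 1) = ((2 : Nat) : Int) := by norm_num
  have e2 : ((m : Int) + 1) = (((m + 1 : Nat)) : Int) := by push_cast; ring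
  rw [e1, e2, PySem.List.slice_natCast, PySem.List.slice_from_natCast,
    PySem.List.slice_to_natCast]
  have hg1 : PySem.List.pyGetD segs ((m : Nat) : Int) "" = segs.getD m "" := by
    simp [PySem.List.pyGetD_natCast]
  have hg2 : PySem.List.pyGetD segs (1 : Int) "" = segs.getD 1 "" := by
    have : (1 : Int) = ((1 : Nat) : Int) := by norm_num
    rw [this, PySem.List.pyGetD_natCast]
  have hleft_ne : (segs.drop 2).take (m - 2) ≠ [] := by
    have : ((segs.drop 2).take (m - 2)).length = min (m - 2) (segs.length - 2) := by simp
    intro hnil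
    rw [hnil] at this
    simp at this
    omega
  have hm1 : m + 1 < segs.length := by omega
  rw [hg1, hg2]
  by_cases hk : segs[m]?.getD "" = segs[1]?.getD "" <;>
    by_cases hlr : (segs.drop 2).take (m - 2) = segs.drop (m + 1) <;>
      simp [List.getD, hk, hlr, hleft_ne, hm1]

theorem coreAux (p : String) (segs : List String) :
    (if segs.length < 5 then p
     else
       if PySem.List.len segs ≤ (1 : Int) then p
       else
         match pvLoopA segs (PySem.List.pyGetD segs (1 : Int) "")
             (PySem.List.pyRange ((1 : Int) + 2) (PySem.List.len segs) 1) with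
         | some r => r
         | none => p)
    =
    (if segs.length < 5 ∨ (segs.length + 1) % 2 ≠ 0 then p
     else
       if segs.getD ((segs.length + 1) / 2) "" == segs.getD 1 ""
           && ((segs.drop 2).take ((segs.length + 1) / 2 - 2) == segs.drop ((segs.length + 1) / 2 + 1)) then
         PySem.Str.join "/" (segs.take ((segs.length + 1) / 2))
       else p) := by
  by_cases h5 : segs.length < 5
  · simp [h5]
  · rw [Nat.not_lt] at h5
    rw [if_neg (by omega), if_neg (by
      rw [PySem.List.len_eq]
      intro h
      omega)]
    rw [pvLoopA_eq_findSome?]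
    have e3 : ((1 : Int) + 2) = 3 := by norm_num
    rw [e3, PySem.List.len_eq]
    by_cases hpar : (segs.length + 1) % 2 = 0
    · -- odd number of segments: the loop can only fire at the midpoint
      rw [if_neg (by omega)]
      set m := (segs.length + 1) / 2 with hm
      rw [findSome?_of_unique ((m : Nat) : Int) _ (by
        intro x hx hxne
        rw [PySem.List.mem_pyRange_one] at hx
        exact pvG_eq_none segs _ x hx.1 hx.2 (by omega))]
      rw [if_pos (by rw [PySem.List.mem_pyRange_one]; omega)]
      rw [pvG_mid segs h5 hpar]
      by_cases hc : (segs.getD m "" == segs.getD 1 ""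
          && ((segs.drop 2).take (m - 2) == segs.drop (m + 1))) = true
      · rw [if_pos hc, if_pos hc]
      · rw [if_neg hc, if_neg hc]
    · -- even number of segments: no split index can balance the halves
      rw [if_pos (by omega)]
      rw [findSome?_of_unique 0 _ (by
        intro x hx _
        rw [PySem.List.mem_pyRange_one] at hx
        exact pvG_eq_none segs _ x hx.1 hx.2 (by omega))]
      rw [if_neg (by rw [PySem.List.mem_pyRange_one]; omega)]

-- ===== VERDICT (by name: the statement is the Claim_ definition above) =====
theorem collapse_redundant_root_suffix_py_spec : Claim_equal_collapse_redundant_root_suffix_py := by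
  intro path_str _
  unfold Spec_collapse_redundant_root_suffix_py
  unfold collapse_redundant_root_suffix_py collapse_redundant_root_suffix_py_alt
  exact coreAux path_str (pvSegments path_str)
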